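-- pv_equiv track=rewrite | github.com/Goodman-lab/TwoBondChem | model_evaluation/random_sample_test_Bmix.py | parah_code
-- ===== SOURCE A (Python) =====
-- def parah_code(given_list):
--
--     first_value=given_list[0]
--     first_code=0
--
--     new_code_ls=[0]
--
--     for v in given_list[1:]:
--
--         if v != first_value:
--             first_value=v
--             first_code += 1
--
--             new_code_ls.append(first_code)
--
--         else:
--             new_code_ls.append(first_code)
--
--     return new_code_ls
-- ===== SOURCE B (Python) =====
-- from itertools import accumulate
--
--
-- def parah_code(given_list):
--     if not given_list:
--         return []
--     flags = [int(a != b) for a, b in zip(given_list, given_list[1:])]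
--     return list(accumulate([0] + flags))
-- ===== Notes on version B (the rewrite author's own statement) =====
-- stated objective: idiomatic
-- what changed: Replaces A's stateful compare-and-increment loop by two staged passes: build a 0/1 boundary-indicator vector from adjacent pairs (zip with the shifted list), then take its running prefix sums with itertools.accumulate.
import Mathlib
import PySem

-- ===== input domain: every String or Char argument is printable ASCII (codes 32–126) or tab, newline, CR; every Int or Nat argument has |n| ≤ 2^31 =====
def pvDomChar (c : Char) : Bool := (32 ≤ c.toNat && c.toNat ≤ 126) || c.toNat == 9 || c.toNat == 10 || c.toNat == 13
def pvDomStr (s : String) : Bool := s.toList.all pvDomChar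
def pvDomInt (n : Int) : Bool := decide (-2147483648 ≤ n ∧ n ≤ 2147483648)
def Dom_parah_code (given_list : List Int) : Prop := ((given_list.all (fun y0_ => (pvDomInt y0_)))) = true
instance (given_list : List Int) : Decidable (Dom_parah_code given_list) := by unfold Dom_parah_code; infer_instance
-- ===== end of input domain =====

-- B replaces A's stateful compare-and-increment loop by two staged passes: a 0/1
-- boundary-indicator vector built from adjacent pairs, then its running prefix sums.
-- Equivalence on nonempty lists (A raises IndexError on []); B returns [] there.


-- ===== PORT A =====
def parah_code (given_list : List Int) : List Int :=
  match PySem.List.pyGet? given_list 0 with      -- given_list[0]; none = IndexError, excluded by Pre_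
  | none => []
  | some first_value₀ =>
    -- for v in given_list[1:]: compare with first_value, bump first_code on change, append
    let st := (PySem.List.slice given_list (some 1) none).foldl
      (fun (st : Int × Int × List Int) v =>
        let fv := st.1; let fc := st.2.1; let acc := st.2.2
        if v ≠ fv then (v, fc + 1, acc ++ [fc + 1])
        else (fv, fc, acc ++ [fc]))
      (first_value₀, 0, [0])
    st.2.2

-- ===== PORT B =====
-- itertools.accumulate over Int, ported by hand (exact: running sums, default op +, no initial)
def pyAccumulateAux : List Int → Int → List Int
  | [], _ => []
  | x :: xs, s => (s + x) :: pyAccumulateAux xs (s + x)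

def pyAccumulate (xs : List Int) : List Int := pyAccumulateAux xs 0

def parah_code_alt (given_list : List Int) : List Int :=
  if given_list = [] then []
  else
    -- flags = [int(a != b) for a, b in zip(given_list, given_list[1:])]
    let flags := (given_list.zip (PySem.List.slice given_list (some 1) none)).map
      (fun p => if p.1 ≠ p.2 then (1 : Int) else 0)
    pyAccumulate (0 :: flags)

-- ===== PRECONDITION & SPEC =====
-- A raises IndexError on the empty list (given_list[0]); it returns on every other list.
def Pre_parah_code (given_list : List Int) : Prop := given_list ≠ []
instance (given_list : List Int) : Decidable (Pre_parah_code given_list) := by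
  unfold Pre_parah_code; infer_instance

def pvWitness_parah_code : List Int := [1, 1, 2]

def Spec_parah_code (given_list : List Int) (out : List Int) : Prop := out = parah_code_alt given_list
instance (given_list : List Int) (out : List Int) : Decidable (Spec_parah_code given_list out) := by unfold Spec_parah_code; infer_instance

-- ===== CLAIM (what is proved, stated in full; the proofs are below) =====
def Claim_equal_parah_code : Prop := ∀ (given_list : List Int), Dom_parah_code given_list → Pre_parah_code given_list → Spec_parah_code given_list (parah_code given_list)

-- ===== LEMMAS AND PROOFS =====

-- the codes A's loop appends, without the accumulator
def codesFrom : List Int → Int → Int → List Int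
  | [], _, _ => []
  | v :: rest, fv, fc =>
    if v ≠ fv then (fc + 1) :: codesFrom rest v (fc + 1)
    else fc :: codesFrom rest fv fc

theorem foldlA_eq_codesFrom (xs : List Int) (fv fc : Int) (acc : List Int) :
    (xs.foldl (fun (st : Int × Int × List Int) v =>
        if v = st.1 then (st.1, st.2.1, st.2.2 ++ [st.2.1])
        else (v, st.2.1 + 1, st.2.2 ++ [st.2.1 + 1])) (fv, fc, acc)).2.2
      = acc ++ codesFrom xs fv fc := by
  induction xs generalizing fv fc acc with
  | nil => simp [codesFrom]
  | cons v rest ih =>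
    by_cases h : v = fv <;> simp [codesFrom, h, ih]

-- the boundary flags of x :: xs, as a structural recursion
def flagsList : Int → List Int → List Int
  | _, [] => []
  | x, v :: rest => (if x ≠ v then (1 : Int) else 0) :: flagsList v rest

theorem zip_map_eq_flagsList (x : Int) (xs : List Int) :
    ((x :: xs).zip xs).map (fun p => if p.1 ≠ p.2 then (1 : Int) else 0)
      = flagsList x xs := by
  induction xs generalizing x with
  | nil => simp [flagsList]
  | cons v rest ih =>
    rw [show ((x :: v :: rest).zip (v :: rest)) = (x, v) :: ((v :: rest).zip rest) from rfl,
       List.map_cons, ih, flagsList]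

-- prefix sums of the flags are exactly A's codes
theorem accAux_flags_eq_codesFrom (xs : List Int) (x : Int) (fc : Int) :
    pyAccumulateAux (flagsList x xs) fc = codesFrom xs x fc := by
  induction xs generalizing x fc with
  | nil => simp [flagsList, codesFrom, pyAccumulateAux]
  | cons v rest ih =>
    by_cases h : x = v
    · simp [flagsList, codesFrom, pyAccumulateAux, h, ih]
    · have h' : ¬ v = x := fun hh => h hh.symm
      simp [flagsList, codesFrom, pyAccumulateAux, h, h', ih]

-- ===== VERDICT (by name: the statement is the Claim_ definition above) =====
theorem parah_code_spec : Claim_equal_parah_code := by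
  intro l _ hpre
  cases l with
  | nil => exact absurd rfl hpre
  | cons x xs =>
    show parah_code (x :: xs) = parah_code_alt (x :: xs)
    unfold parah_code parah_code_alt
    simp only [PySem.List.slice_from_one, List.tail_cons, if_neg (List.cons_ne_nil x xs)]
    rw [zip_map_eq_flagsList]
    simp [PySem.List.pyGet?, PySem.List.pyIdx?, foldlA_eq_codesFrom,
      pyAccumulate, pyAccumulateAux, accAux_flags_eq_codesFrom]
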